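-- pv_equiv track=rewrite | github.com/jtagrgh/aoc2023 | day13/day13.py | is_mirrored
-- ===== SOURCE A (Python) =====
-- def is_mirrored(matrix, i):
--     n_above = i
--     n_below = len(matrix) - i - 2
--     m = min(n_above, n_below)
--     for j in range(m+1):
--         if matrix[i-j] != matrix[i+1+j]:
--             return False
--     return True
-- ===== SOURCE B (Python) =====
-- def is_mirrored(matrix, i):
--     m = min(i, len(matrix) - i - 2)
--     if m < 0:
--         return True
--     return matrix[i-m:i+1][::-1] == matrix[i+1:i+2+m]
-- ===== Notes on version B (the rewrite author's own statement) =====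
-- stated objective: simpler
-- what changed: Replaces the explicit outward index loop with two contiguous slices compared by a single reversed list equality.
import Mathlib
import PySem

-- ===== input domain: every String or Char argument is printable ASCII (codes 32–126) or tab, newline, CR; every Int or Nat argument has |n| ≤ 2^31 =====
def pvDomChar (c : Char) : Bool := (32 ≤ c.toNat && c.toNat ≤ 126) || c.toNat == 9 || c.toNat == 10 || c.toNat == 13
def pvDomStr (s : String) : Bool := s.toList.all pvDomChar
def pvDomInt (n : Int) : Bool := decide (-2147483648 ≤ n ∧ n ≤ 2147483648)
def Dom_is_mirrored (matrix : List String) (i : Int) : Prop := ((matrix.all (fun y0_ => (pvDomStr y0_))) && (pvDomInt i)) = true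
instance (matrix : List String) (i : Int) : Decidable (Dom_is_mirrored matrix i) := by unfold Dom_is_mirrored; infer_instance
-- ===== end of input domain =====

-- B replaces A's explicit outward index loop with two contiguous slices compared by one reversed list equality (simpler decomposition).


-- ===== PORT A =====
-- A's for-loop over range(m+1) with early 'return False'; in the loop both
-- indices are provably in range (0 ≤ i-j and i+1+j < len whenever the range is
-- nonempty), so pyGet? is exact Python indexing here.
def is_mirrored_loop (matrix : List String) (i : Int) : List Int → Bool
  | [] => true
  | j :: rest =>
    if PySem.List.pyGet? matrix (i - j) ≠ PySem.List.pyGet? matrix (i + 1 + j) then false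
    else is_mirrored_loop matrix i rest

def is_mirrored (matrix : List String) (i : Int) : Bool :=
  let n_above := i
  let n_below := (matrix.length : Int) - i - 2
  let m := min n_above n_below
  is_mirrored_loop matrix i (PySem.List.pyRange 0 (m + 1) 1)

-- ===== PORT B =====
def is_mirrored_alt (matrix : List String) (i : Int) : Bool :=
  let m := min i ((matrix.length : Int) - i - 2)
  if m < 0 then true
  else (PySem.List.slice matrix (some (i - m)) (some (i + 1))).reverse
         == PySem.List.slice matrix (some (i + 1)) (some (i + 2 + m))

-- ===== PRECONDITION & SPEC =====
def Spec_is_mirrored (matrix : List String) (i : Int) (out : Bool) : Prop := out = is_mirrored_alt matrix i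
instance (matrix : List String) (i : Int) (out : Bool) : Decidable (Spec_is_mirrored matrix i out) := by unfold Spec_is_mirrored; infer_instance

-- ===== CLAIM (what is proved, stated in full; the proofs are below) =====
def Claim_equal_is_mirrored : Prop := ∀ (matrix : List String) (i : Int), Dom_is_mirrored matrix i → Spec_is_mirrored matrix i (is_mirrored matrix i)

-- ===== LEMMAS AND PROOFS =====

-- A's loop over range(j0, m+1) returns true iff every remaining pair matches.
theorem is_mirrored_loop_iff (matrix : List String) (i : Int) (j0 m : Int) :
    is_mirrored_loop matrix i (PySem.List.pyRange j0 (m + 1) 1) = true ↔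
      ∀ k : Int, j0 ≤ k → k ≤ m →
        PySem.List.pyGet? matrix (i - k) = PySem.List.pyGet? matrix (i + 1 + k) := by
  by_cases h : m + 1 ≤ j0
  · rw [PySem.List.pyRange_one_eq_nil h]
    simp [is_mirrored_loop]
    intro k hk1 hk2; omega
  · have hlt : j0 < m + 1 := by omega
    rw [PySem.List.pyRange_one_cons hlt]
    simp only [is_mirrored_loop]
    split_ifs with hne
    · simp only [false_iff, not_forall]
      exact ⟨j0, le_refl _, by omega, hne⟩
    · rw [not_not] at hne
      rw [is_mirrored_loop_iff matrix i (j0 + 1) m]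
      constructor
      · intro H k hk1 hk2
        rcases eq_or_lt_of_le hk1 with rfl | h'
        · exact hne
        · exact H k (by omega) hk2
      · intro H k hk1 hk2
        exact H k (by omega) hk2
termination_by (m + 1 - j0).toNat
decreasing_by omega

theorem alt_iff_nat (matrix : List String) (I M : Nat)
    (hmi : M ≤ I) (hlen : I + 2 + M ≤ matrix.length) :
    ((matrix.drop (I - M)).take (M + 1)).reverse = (matrix.drop (I + 1)).take (M + 1) ↔
      ∀ k : Nat, k ≤ M → matrix[I - k]? = matrix[I + 1 + k]? := by
  have hL1 : ((matrix.drop (I - M)).take (M + 1)).length = M + 1 := by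
    simp [List.length_take, List.length_drop]; omega
  have hL2 : ((matrix.drop (I + 1)).take (M + 1)).length = M + 1 := by
    simp [List.length_take, List.length_drop]; omega
  constructor
  · intro H k hk
    have := congrArg (fun l => l[k]?) H
    simp only at this
    rw [List.getElem?_reverse (by rw [hL1]; omega)] at this
    rw [hL1, Nat.add_sub_cancel] at this
    have hidx1 : M - k < ((matrix.drop (I - M)).take (M + 1)).length := by rw [hL1]; omega
    have hidx2 : k < ((matrix.drop (I + 1)).take (M + 1)).length := by rw [hL2]; omega
    rw [List.getElem?_eq_getElem hidx1, List.getElem?_eq_getElem hidx2] at this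
    simp only [List.getElem_take, List.getElem_drop] at this
    rw [show I - k = I - M + (M - k) from by omega]
    have h1 : I - M + (M - k) < matrix.length := by omega
    have h2 : I + 1 + k < matrix.length := by omega
    rw [List.getElem?_eq_getElem h1, List.getElem?_eq_getElem h2]
    exact congrArg some (Option.some.inj this)
  · intro H
    apply List.ext_getElem
    · rw [List.length_reverse, hL1, hL2]
    · intro n h1 h2
      rw [List.length_reverse, hL1] at h1
      rw [hL2] at h2
      have := H n (by omega)
      rw [show I - n = I - M + (M - n) from by omega] at this
      have h1' : I - M + (M - n) < matrix.length := by omega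
      have h2' : I + 1 + n < matrix.length := by omega
      rw [List.getElem?_eq_getElem h1', List.getElem?_eq_getElem h2'] at this
      have hrev : ((matrix.drop (I - M)).take (M + 1)).reverse[n] =
          ((matrix.drop (I - M)).take (M + 1))[M - n]'(by rw [hL1]; omega) := by
        rw [List.getElem_reverse]; congr 1; rw [hL1, Nat.add_sub_cancel]
      rw [hrev]
      simp only [List.getElem_take, List.getElem_drop]
      exact Option.some.inj this

-- B's reversed-slice equality unfolded to the same pairwise condition.
theorem alt_iff (matrix : List String) (i m : Int)
    (hm0 : 0 ≤ m) (hmi : m ≤ i) (hlen : i + 2 + m ≤ (matrix.length : Int)) :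
    ((PySem.List.slice matrix (some (i - m)) (some (i + 1))).reverse
        == PySem.List.slice matrix (some (i + 1)) (some (i + 2 + m))) = true ↔
      ∀ k : Int, 0 ≤ k → k ≤ m →
        PySem.List.pyGet? matrix (i - k) = PySem.List.pyGet? matrix (i + 1 + k) := by
  have hi0 : 0 ≤ i := le_trans hm0 hmi
  obtain ⟨M, rfl⟩ : ∃ M : Nat, m = (M : Int) := ⟨m.toNat, by omega⟩
  obtain ⟨I, rfl⟩ : ∃ I : Nat, i = (I : Int) := ⟨i.toNat, by omega⟩
  rw [beq_iff_eq]
  rw [PySem.List.slice_toNat matrix (show (0:Int) ≤ (I:Int) - M by omega) (show (0:Int) ≤ (I:Int) + 1 by omega),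
      PySem.List.slice_toNat matrix (show (0:Int) ≤ (I:Int) + 1 by omega) (show (0:Int) ≤ (I:Int) + 2 + M by omega),
      show ((I:Int) - M).toNat = I - M from by omega,
      show ((I:Int) + 1).toNat = I + 1 from by omega,
      show ((I:Int) + 2 + M).toNat = I + 2 + M from by omega,
      show I + 1 - (I - M) = M + 1 from by omega,
      show I + 2 + M - (I + 1) = M + 1 from by omega]
  rw [alt_iff_nat matrix I M (by omega) (by omega)]
  constructor
  · intro H k hk0 hkm
    obtain ⟨K, rfl⟩ : ∃ K : Nat, k = (K : Int) := ⟨k.toNat, by omega⟩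
    rw [show (I:Int) - K = ((I - K : Nat) : Int) from by omega,
        show (I:Int) + 1 + K = ((I + 1 + K : Nat) : Int) from by omega,
        PySem.List.pyGet?_natCast, PySem.List.pyGet?_natCast]
    exact H K (by omega)
  · intro H K hK
    have := H (K : Int) (by omega) (by omega)
    rwa [show (I:Int) - K = ((I - K : Nat) : Int) from by omega,
         show (I:Int) + 1 + K = ((I + 1 + K : Nat) : Int) from by omega,
         PySem.List.pyGet?_natCast, PySem.List.pyGet?_natCast] at this

-- ===== VERDICT (by name: the statement is the Claim_ definition above) =====
theorem is_mirrored_spec : Claim_equal_is_mirrored := by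
  intro matrix i _
  unfold Spec_is_mirrored is_mirrored is_mirrored_alt
  change is_mirrored_loop matrix i (PySem.List.pyRange 0 (min i ((matrix.length : Int) - i - 2) + 1) 1)
      = (if min i ((matrix.length : Int) - i - 2) < 0 then true
         else (PySem.List.slice matrix (some (i - min i ((matrix.length : Int) - i - 2))) (some (i + 1))).reverse
                == PySem.List.slice matrix (some (i + 1)) (some (i + 2 + min i ((matrix.length : Int) - i - 2))))
  set m := min i ((matrix.length : Int) - i - 2) with hm
  by_cases hneg : m < 0
  · rw [if_pos hneg]
    rw [PySem.List.pyRange_one_eq_nil (by omega)]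
    rfl
  · rw [not_lt] at hneg
    rw [if_neg (by omega)]
    have hmi : m ≤ i := min_le_left _ _
    have hlen : i + 2 + m ≤ (matrix.length : Int) := by
      have := min_le_right i ((matrix.length : Int) - i - 2); omega
    have hA := is_mirrored_loop_iff matrix i 0 m
    have hB := alt_iff matrix i m hneg hmi hlen
    rw [Bool.eq_iff_iff, hA, hB]
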